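-- pv_equiv track=rewrite | github.com/pypi-data/pypi-mirror-402 | packages/libdev/libdev-0.101.tar.gz/libdev-0.101/libdev/check.py | fake_login
-- ===== SOURCE A (Python) =====
-- def fake_login(value: str) -> bool:
--     """Check a login / name for a test format"""
--
--     if value is None:
--         return False
--
--     value = value.lower()
--
--     return any(
--         fake in value
--         for fake in (
--             "test",
--             "тест",
--             "check",
--             "demo",
--             "asd",
--             "asf",
--             "qwe",
--             "sdf",
--             "sfg",
--             "sfd",
--             "hgf",
--             "gfd",
--             "dgf",
--             "qaz",
--             "wsx",
--             "edc",
--             "rfv",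
--             "qwd",
--             "lalala",
--             "lolkek",
--             "0000",
--             "1111",
--             "2222",
--             "3333",
--             "4444",
--             "5555",
--             "6666",
--             "7777",
--             "8888",
--             "9999",
--             "1234",
--             "9876",  # '1212', '2323'
--             "ыва",
--             "фыв",
--             "йцу",
--             "aaaa",
--             "bbb",
--             "ccc",
--             "rrr",
--             "zzz",
--             "ааа",
--             "ббб",
--             "ввв",
--             "ггг",
--             "ддд",
--             "еее",
--             "ёёё",
--             "жжж",
--             "ззз",
--             "иии",
--             "ййй",
--             "ккк",
--             "ллл",
--             "ммм",
--             "ннн",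
--             "ооо",
--             "ппп",
--             "ррр",
--             "ссс",
--             "ттт",
--             "ууу",
--             "ффф",
--             "ххх",
--             "ццц",
--             "ччч",
--             "шшш",
--             "щщщ",
--             "ъъъ",
--             "ыыы",
--             "ььь",
--             "эээ",
--             "ююю",
--             "яяя",
--         )
--     )
-- ===== SOURCE B (Python) =====
-- # One first-character index + a single left-to-right pass: at each position only the
-- # patterns starting with that character are tried, instead of one full scan per pattern.
-- _FAKES = (
--     "test тест check demo asd asf qwe sdf sfg sfd hgf gfd dgf qaz wsx edc rfv qwd "
--     "lalala lolkek 0000 1111 2222 3333 4444 5555 6666 7777 8888 9999 1234 9876 "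
--     "ыва фыв йцу aaaa bbb ccc rrr zzz ааа ббб ввв ггг ддд еее ёёё жжж ззз иии ййй "
--     "ккк ллл ммм ннн ооо ппп ррр ссс ттт ууу ффф ххх ццц ччч шшш щщщ ъъъ ыыы ььь "
--     "эээ ююю яяя"
-- ).split()
--
-- _INDEX = {}
-- for _f in _FAKES:
--     _INDEX.setdefault(_f[0], []).append(_f)
--
--
-- def fake_login(value: str) -> bool:
--     """Check a login / name for a test format"""
--     if value is None:
--         return False
--     v = value.lower()
--     for i, c in enumerate(v):
--         for f in _INDEX.get(c, ()):
--             if v.startswith(f, i):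
--                 return True
--     return False
-- ===== Notes on version B (the rewrite author's own statement) =====
-- stated objective: faster
-- what changed: A runs one independent full substring scan of the string per fake pattern (73 scans); B precomputes a dict indexing the patterns by their first character and makes a single left-to-right pass, at each position testing startswith only for the few patterns beginning with that character.
import Mathlib
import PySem

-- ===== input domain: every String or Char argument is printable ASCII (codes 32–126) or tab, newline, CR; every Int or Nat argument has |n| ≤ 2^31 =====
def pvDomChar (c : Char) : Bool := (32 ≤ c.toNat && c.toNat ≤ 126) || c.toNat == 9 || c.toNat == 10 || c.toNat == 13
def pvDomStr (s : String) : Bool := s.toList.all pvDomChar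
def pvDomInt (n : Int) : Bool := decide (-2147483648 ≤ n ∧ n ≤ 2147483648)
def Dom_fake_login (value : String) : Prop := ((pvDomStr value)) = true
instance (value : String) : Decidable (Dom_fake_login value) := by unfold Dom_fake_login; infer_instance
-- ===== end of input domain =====

-- B builds a first-character index of the fake patterns once and makes a single
-- left-to-right pass, trying at each position only the patterns starting with that
-- character, instead of A's one full substring scan per pattern (alternative structure).

-- ===== PORT A =====
-- the fake-substring tuple literal of A
def pvFakes : List (List Char) :=
  ["test", "тест", "check", "demo", "asd", "asf", "qwe", "sdf", "sfg", "sfd", "hgf", "gfd", "dgf", "qaz", "wsx", "edc", "rfv", "qwd", "lalala", "lolkek", "0000", "1111", "2222", "3333", "4444", "5555", "6666", "7777", "8888", "9999", "1234", "9876", "ыва", "фыв", "йцу", "aaaa", "bbb", "ccc", "rrr", "zzz", "ааа", "ббб", "ввв", "ггг", "ддд", "еее", "ёёё", "жжж", "ззз", "иии", "ййй", "ккк", "ллл", "ммм", "ннн", "ооо", "ппп", "ррр", "ссс", "ттт", "ууу", "ффф", "ххх", "ццц", "ччч", "шшш", "щщщ", "ъъъ", "ыыы", "ььь", "эээ", "ююю",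 "яяя"].map String.toList

def fake_login (value : String) : Bool :=
  -- value is None → False: a String argument is never None; value.lower():
  let v := PySem.Chars.lower value.toList
  -- any(fake in value for fake in (...)):
  pvFakes.any (fun f => PySem.Chars.isIn f v)

-- ===== PORT B =====
-- _FAKES = "<space-joined patterns>".split()
def pvFakeWords : List (List Char) :=
  PySem.Chars.split₀ "test тест check demo asd asf qwe sdf sfg sfd hgf gfd dgf qaz wsx edc rfv qwd lalala lolkek 0000 1111 2222 3333 4444 5555 6666 7777 8888 9999 1234 9876 ыва фыв йцу aaaa bbb ccc rrr zzz ааа ббб ввв ггг ддд еее ёёё жжж ззз иии ййй ккк ллл ммм ннн ооо ппп ррр ссс ттт ууу ффф ххх ццц ччч шшш щщщ ъъъ ыыы ььь эээ ююю яяя".toList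

-- loop body: _INDEX.setdefault(_f[0], []).append(_f); _f[0] is pyGet? _f 0
-- (IndexError branch 'none' is unreachable: split() yields no empty word)
def pvIndexStep (d : PySem.Dict Char (List (List Char))) (f : List Char) :
    PySem.Dict Char (List (List Char)) :=
  match PySem.List.pyGet? f 0 with
  | some c => d.modify c [] (fun l => l ++ [f])
  | none => d

-- _INDEX, built by the module-level for loop
def pvIndex : PySem.Dict Char (List (List Char)) :=
  pvFakeWords.foldl pvIndexStep PySem.Dict.empty

def fake_login_alt (value : String) : Bool :=
  let v := PySem.Chars.lower value.toList
  -- for i, c in enumerate(v): for f in _INDEX.get(c, ()): if v.startswith(f, i): return True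
  -- v.startswith(f, i) with 0 ≤ i ≤ len(v) is exactly startswith (v.drop i) f
  (PySem.List.enumerate v).any (fun ic =>
    ((pvIndex.getD ic.2 []).any (fun f => PySem.Chars.startswith (v.drop ic.1.toNat) f)))

-- ===== PRECONDITION & SPEC =====
def Spec_fake_login (value : String) (out : Bool) : Prop := out = fake_login_alt value
instance (value : String) (out : Bool) : Decidable (Spec_fake_login value out) := by unfold Spec_fake_login; infer_instance

-- ===== CLAIM (what is proved, stated in full; the proofs are below) =====
def Claim_equal_fake_login : Prop := ∀ (value : String), Dom_fake_login value → Spec_fake_login value (fake_login value)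

-- ===== LEMMAS AND PROOFS =====

-- the split() literal of B yields exactly A's tuple
set_option maxRecDepth 20000 in
theorem pvFakeWords_eq : pvFakeWords = pvFakes := by decide

-- every fake is nonempty
theorem pvFakes_ne_nil : ∀ f ∈ pvFakes, f ≠ [] := by decide

-- what the index-building fold produces at each key
theorem pvIndex_fold_getD (L : List (List Char)) (d : PySem.Dict Char (List (List Char))) (c : Char) :
    (L.foldl pvIndexStep d).getD c [] =
      d.getD c [] ++ L.filter (fun f => f.head? == some c) := by
  induction L generalizing d with
  | nil => simp
  | cons f t ih =>
    rw [List.foldl_cons, ih]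
    cases f with
    | nil => simp [pvIndexStep, PySem.List.pyGet?, PySem.List.pyIdx?]
    | cons c' rest =>
      by_cases h : c = c'
      · subst h
        simp [pvIndexStep, PySem.List.pyGet?, PySem.List.pyIdx?, PySem.Dict.getD_modify_self]
      · have hne : c ≠ c' := h
        simp [pvIndexStep, PySem.List.pyGet?, PySem.List.pyIdx?,
          PySem.Dict.getD_modify_of_ne, hne, Ne.symm hne]

theorem pvIndex_mem (c : Char) (f : List Char) :
    f ∈ pvIndex.getD c [] ↔ f ∈ pvFakes ∧ f.head? = some c := by
  rw [pvIndex, pvIndex_fold_getD, pvFakeWords_eq]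
  simp [List.mem_filter]

-- the core equivalence, for any character list w (both ports apply it to lower(value))
theorem pv_main (w : List Char) :
    pvFakes.any (fun f => PySem.Chars.isIn f w) =
    (PySem.List.enumerate w).any (fun ic =>
      ((pvIndex.getD ic.2 []).any (fun f => PySem.Chars.startswith (w.drop ic.1.toNat) f))) := by
  rw [Bool.eq_iff_iff]
  simp only [List.any_eq_true]
  constructor
  · rintro ⟨f, hf, hin⟩
    obtain ⟨j, hj⟩ := (PySem.Chars.exists_prefix_drop_iff_isIn f w).mpr hin
    have hfne : f ≠ [] := pvFakes_ne_nil f hf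
    have hjlt : j < w.length := by
      by_contra h
      rw [List.drop_eq_nil_of_le (Nat.le_of_not_lt h), List.prefix_nil] at hj
      exact hfne hj
    refine ⟨((j : Int), w[j]), ?_, f, ?_, ?_⟩
    · rw [PySem.List.mem_enumerate_iff]
      exact ⟨j, hjlt, by simp⟩
    · rw [pvIndex_mem]
      refine ⟨hf, ?_⟩
      obtain ⟨a, t, ha⟩ := List.exists_cons_of_ne_nil hfne
      subst ha
      obtain ⟨r, hr⟩ := hj
      have h2 : w[j]? = some a := by rw [← List.head?_drop, ← hr]; rfl
      rw [List.getElem?_eq_getElem hjlt] at h2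
      have h3 : w[j] = a := Option.some.inj h2
      simp [h3]
    · simp only [Int.toNat_natCast]
      exact (PySem.Chars.startswith_iff _ _).mpr hj
  · rintro ⟨ic, hic, f, hfm, hsw⟩
    rw [PySem.List.mem_enumerate_iff] at hic
    obtain ⟨k, hk, rfl⟩ := hic
    obtain ⟨hf, _⟩ := (pvIndex_mem _ _).mp hfm
    refine ⟨f, hf, (PySem.Chars.exists_prefix_drop_iff_isIn f w).mp ⟨k, ?_⟩⟩
    have := (PySem.Chars.startswith_iff _ _).mp hsw
    simpa using this

-- ===== VERDICT (by name: the statement is the Claim_ definition above) =====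
theorem fake_login_spec : Claim_equal_fake_login := by
  intro value _
  unfold Spec_fake_login fake_login fake_login_alt
  exact pv_main (PySem.Chars.lower value.toList)
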